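-- pv_equiv track=rewrite | github.com/myceldigital/herald | src/herald_cli/parse.py | _merge_guideline_meta
-- ===== SOURCE A (Python) =====
-- def _merge_guideline_meta(metas: list[dict]) -> dict:
--     """Merge chunk-level guideline metadata, preferring the first non-empty value."""
--     merged = {
--         "title": "",
--         "short_title": "",
--         "source": "",
--         "version": "",
--         "last_updated": "",
--         "url": None,
--         "condition": "",
--         "population": "",
--     }
--
--     for meta in metas:
--         for key in merged:
--             value = meta.get(key)
--             if value in ("", None):
--                 continue
--             if merged[key] in ("", None):
--                 merged[key] = value
--             elif key in ("title", "population", "condition") and len(str(value)) > len(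
--                 str(merged[key])
--             ):
--                 merged[key] = value
--
--     return merged
-- ===== SOURCE B (Python) =====
-- def _merge_guideline_meta(metas: list[dict]) -> dict:
--     """Merge chunk-level guideline metadata, computing each output key independently."""
--
--     def first_nonempty(key, default):
--         return next((m.get(key) for m in metas if m.get(key) not in ("", None)), default)
--
--     def longest(key):
--         candidates = [m.get(key) for m in metas if m.get(key) not in ("", None)]
--         return max(candidates, key=lambda v: len(str(v)), default="")
--
--     return {
--         "title": longest("title"),
--         "short_title": first_nonempty("short_title", ""),
--         "source": first_nonempty("source", ""),
--         "version": first_nonempty("version", ""),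
--         "last_updated": first_nonempty("last_updated", ""),
--         "url": first_nonempty("url", None),
--         "condition": longest("condition"),
--         "population": longest("population"),
--     }
-- ===== Notes on version B (the rewrite author's own statement) =====
-- stated objective: simpler
-- what changed: B computes each output key independently (first non-empty value via next() for the short keys, longest non-empty value via max(..., key=len, default='') for title/population/condition) and assembles the result dict literally, instead of threading one mutable merged dict through a nested loop over metas and keys.
import Mathlib
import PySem

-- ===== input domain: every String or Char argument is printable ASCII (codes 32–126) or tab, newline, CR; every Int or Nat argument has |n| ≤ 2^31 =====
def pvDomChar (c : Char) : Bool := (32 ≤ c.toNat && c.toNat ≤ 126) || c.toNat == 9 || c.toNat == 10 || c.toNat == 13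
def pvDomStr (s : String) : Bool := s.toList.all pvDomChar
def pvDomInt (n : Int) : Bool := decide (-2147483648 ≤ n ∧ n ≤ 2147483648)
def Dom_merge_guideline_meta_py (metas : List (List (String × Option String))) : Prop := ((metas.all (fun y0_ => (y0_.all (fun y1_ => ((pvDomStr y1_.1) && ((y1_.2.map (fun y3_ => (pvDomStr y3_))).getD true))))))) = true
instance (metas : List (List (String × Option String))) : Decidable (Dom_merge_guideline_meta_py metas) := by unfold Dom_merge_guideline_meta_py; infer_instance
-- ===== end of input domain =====

-- B computes each output key independently (first non-empty / longest non-empty via max) instead of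
-- threading one mutable merged dict through a nested loop over metas and keys; objective: simpler.

-- ===== PORT A =====
-- shared helpers porting Python fragments both sources contain verbatim:
-- mt.get(key) (missing key -> None), `v in ("", None)`, len(str(v)) (str(None) = "None", length 4)
def pyMetaGet (mt : List (String × Option String)) (key : String) : Option String :=
  ((PySem.Dict.mk mt).get? key).getD none

def isEmptyVal (v : Option String) : Bool := v == some "" || v == none

def pyStrLen (v : Option String) : Int :=
  match v with
  | some s => PySem.Str.len s
  | none => 4

-- body of A's inner loop, for one key of merged
def aStep (mt : List (String × Option String)) (m : PySem.Dict String (Option String))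
    (key : String) : PySem.Dict String (Option String) :=
  let value := pyMetaGet mt key
  if isEmptyVal value then m
  else if isEmptyVal (m.getD key none) then m.insert key value
  else if ((key == "title" || key == "population" || key == "condition")
          && decide (pyStrLen (m.getD key none) < pyStrLen value)) then m.insert key value
  else m

-- `for key in merged:` — merged's keys never change during the inner loop
def mergeStep (m : PySem.Dict String (Option String)) (mt : List (String × Option String)) :
    PySem.Dict String (Option String) :=
  m.keys.foldl (aStep mt) m

def initItems : List (String × Option String) :=
  [("title", some ""), ("short_title", some ""), ("source", some ""), ("version", some ""),
   ("last_updated", some ""), ("url", none), ("condition", some ""), ("population", some "")]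

def merge_guideline_meta_py (metas : List (List (String × Option String))) :
    List (String × Option String) :=
  (metas.foldl mergeStep (PySem.Dict.mk initItems)).items

-- ===== PORT B =====
-- next((m.get(key) for m in metas if m.get(key) not in ("", None)), default)
def firstNonempty (metas : List (List (String × Option String))) (key : String)
    (dflt : Option String) : Option String :=
  match metas with
  | [] => dflt
  | m :: rest =>
    let v := pyMetaGet m key
    if isEmptyVal v then firstNonempty rest key dflt else v

-- max([m.get(key) for m in metas if m.get(key) not in ("", None)], key=lambda v: len(str(v)), default="")
def longestVal (metas : List (List (String × Option String))) (key : String) : Option String :=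
  PySem.List.maxD
    ((metas.filter (fun m => !(isEmptyVal (pyMetaGet m key)))).map (fun m => pyMetaGet m key))
    pyStrLen (some "")

def merge_guideline_meta_py_alt (metas : List (List (String × Option String))) :
    List (String × Option String) :=
  [("title", longestVal metas "title"),
   ("short_title", firstNonempty metas "short_title" (some "")),
   ("source", firstNonempty metas "source" (some "")),
   ("version", firstNonempty metas "version" (some "")),
   ("last_updated", firstNonempty metas "last_updated" (some "")),
   ("url", firstNonempty metas "url" none),
   ("condition", longestVal metas "condition"),
   ("population", longestVal metas "population")]

-- ===== PRECONDITION & SPEC =====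
def Spec_merge_guideline_meta_py (metas : List (List (String × Option String))) (out : List (String × Option String)) : Prop := out = merge_guideline_meta_py_alt metas
instance (metas : List (List (String × Option String))) (out : List (String × Option String)) : Decidable (Spec_merge_guideline_meta_py metas out) := by unfold Spec_merge_guideline_meta_py; infer_instance

-- ===== CLAIM (what is proved, stated in full; the proofs are below) =====
def Claim_equal_merge_guideline_meta_py : Prop := ∀ (metas : List (List (String × Option String))), Dom_merge_guideline_meta_py metas → Spec_merge_guideline_meta_py metas (merge_guideline_meta_py metas)

-- ===== LEMMAS AND PROOFS =====

-- A's inner-loop update of a single key's value, seen per key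
def valStep (key : String) (mt : List (String × Option String)) (c : Option String) :
    Option String :=
  let v := pyMetaGet mt key
  if isEmptyVal v then c
  else if isEmptyVal c then v
  else if ((key == "title" || key == "population" || key == "condition")
          && decide (pyStrLen c < pyStrLen v)) then v
  else c

lemma aStep_cases (mt : List (String × Option String)) (m : PySem.Dict String (Option String))
    (key : String) :
    aStep mt m key = m ∨ aStep mt m key = m.insert key (pyMetaGet mt key) := by
  simp only [aStep]
  split_ifs <;> first | exact Or.inl rfl | exact Or.inr rfl

lemma getD_aStep_of_ne (mt : List (String × Option String))
    (m : PySem.Dict String (Option String)) (key k : String) (h : k ≠ key) :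
    (aStep mt m key).getD k none = m.getD k none := by
  rcases aStep_cases mt m key with e | e <;> rw [e]
  rw [PySem.Dict.getD_insert_of_ne _ _ _ h]

lemma contains_aStep (mt : List (String × Option String))
    (m : PySem.Dict String (Option String)) (key k : String) (h : m.contains k = true) :
    (aStep mt m key).contains k = true := by
  rcases aStep_cases mt m key with e | e <;> rw [e]
  · exact h
  · simp [PySem.Dict.contains_insert, h]

lemma keys_aStep (mt : List (String × Option String))
    (m : PySem.Dict String (Option String)) (key : String) (h : m.contains key = true) :
    (aStep mt m key).keys = m.keys := by
  rcases aStep_cases mt m key with e | e <;> rw [e]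
  rw [PySem.Dict.keys_insert_of_contains _ _ h]

lemma getD_aStep_self (mt : List (String × Option String))
    (m : PySem.Dict String (Option String)) (key : String) :
    (aStep mt m key).getD key none = valStep key mt (m.getD key none) := by
  unfold aStep valStep
  by_cases h1 : isEmptyVal (pyMetaGet mt key) = true
  · simp [h1]
  · by_cases h2 : isEmptyVal (m.getD key none) = true
    · simp [h1, h2, PySem.Dict.getD_insert_self]
    · by_cases h3 : ((key == "title" || key == "population" || key == "condition")
          && decide (pyStrLen (m.getD key none) < pyStrLen (pyMetaGet mt key))) = true
      · simp [h1, h2, h3, PySem.Dict.getD_insert_self]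
      · simp [h1, h2, h3]

lemma getD_foldl_aStep_not_mem (mt : List (String × Option String)) (ks : List String)
    (m : PySem.Dict String (Option String)) (k : String) (h : k ∉ ks) :
    (ks.foldl (aStep mt) m).getD k none = m.getD k none := by
  induction ks generalizing m with
  | nil => rfl
  | cons key rest ih =>
    simp only [List.foldl_cons]
    rw [ih _ (by simp at h; exact h.2), getD_aStep_of_ne _ _ _ _ (by simp at h; exact h.1)]

lemma keys_foldl_aStep (mt : List (String × Option String)) (ks : List String)
    (m : PySem.Dict String (Option String)) (h : ∀ k ∈ ks, m.contains k = true) :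
    (ks.foldl (aStep mt) m).keys = m.keys := by
  induction ks generalizing m with
  | nil => rfl
  | cons key rest ih =>
    simp only [List.foldl_cons]
    rw [ih _ (fun k hk => contains_aStep _ _ _ _ (h k (List.mem_cons_of_mem _ hk))),
        keys_aStep _ _ _ (h key (List.mem_cons_self))]

lemma getD_foldl_aStep (mt : List (String × Option String)) (ks : List String)
    (m : PySem.Dict String (Option String)) (k : String) (hnd : ks.Nodup) (hk : k ∈ ks) :
    (ks.foldl (aStep mt) m).getD k none = valStep k mt (m.getD k none) := by
  induction ks generalizing m with
  | nil => cases hk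
  | cons key rest ih =>
    simp only [List.foldl_cons]
    rcases List.mem_cons.mp hk with rfl | hmem
    · rw [getD_foldl_aStep_not_mem _ _ _ _ (List.nodup_cons.mp hnd).1, getD_aStep_self]
    · have hne : k ≠ key := fun e => (List.nodup_cons.mp hnd).1 (e ▸ hmem)
      rw [ih _ (List.nodup_cons.mp hnd).2 hmem, getD_aStep_of_ne _ _ _ _ hne]

def keyList : List String :=
  ["title", "short_title", "source", "version", "last_updated", "url", "condition", "population"]

lemma keys_mergeStep (m : PySem.Dict String (Option String)) (mt : List (String × Option String))
    (h : m.keys = keyList) : (mergeStep m mt).keys = keyList := by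
  unfold mergeStep
  rw [keys_foldl_aStep mt m.keys m
    (fun k hk => (PySem.Dict.contains_iff_mem_keys m k).mpr hk), h]

lemma getD_mergeStep (m : PySem.Dict String (Option String)) (mt : List (String × Option String))
    (k : String) (h : m.keys = keyList) (hk : k ∈ keyList) :
    (mergeStep m mt).getD k none = valStep k mt (m.getD k none) := by
  unfold mergeStep
  rw [h]
  exact getD_foldl_aStep _ _ _ _ (by decide) hk

lemma getD_foldl_mergeStep (metas : List (List (String × Option String)))
    (m : PySem.Dict String (Option String)) (k : String) (h : m.keys = keyList)
    (hk : k ∈ keyList) :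
    (metas.foldl mergeStep m).getD k none = metas.foldl (fun c mt => valStep k mt c) (m.getD k none) := by
  induction metas generalizing m with
  | nil => rfl
  | cons mt rest ih =>
    simp only [List.foldl_cons]
    rw [ih _ (keys_mergeStep _ _ h), getD_mergeStep _ _ _ h hk]

lemma keys_foldl_mergeStep (metas : List (List (String × Option String)))
    (m : PySem.Dict String (Option String)) (h : m.keys = keyList) :
    (metas.foldl mergeStep m).keys = keyList := by
  induction metas generalizing m with
  | nil => exact h
  | cons mt rest ih => exact ih _ (keys_mergeStep _ _ h)

-- the four shapes one valStep application can take
lemma valStep_of_empty_v (key : String) (mt : List (String × Option String)) (c : Option String)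
    (h : isEmptyVal (pyMetaGet mt key) = true) : valStep key mt c = c := by
  simp [valStep, h]

lemma valStep_of_empty_c (key : String) (mt : List (String × Option String)) (c : Option String)
    (h1 : isEmptyVal (pyMetaGet mt key) = false) (h2 : isEmptyVal c = true) :
    valStep key mt c = pyMetaGet mt key := by
  simp [valStep, h1, h2]

lemma valStep_short (key : String) (mt : List (String × Option String)) (c : Option String)
    (hkey : (key == "title" || key == "population" || key == "condition") = false)
    (h1 : isEmptyVal (pyMetaGet mt key) = false) (h2 : isEmptyVal c = false) :
    valStep key mt c = c := by
  simp [valStep, h1, h2, hkey]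

lemma valStep_long (key : String) (mt : List (String × Option String)) (c : Option String)
    (hkey : (key == "title" || key == "population" || key == "condition") = true)
    (h1 : isEmptyVal (pyMetaGet mt key) = false) (h2 : isEmptyVal c = false) :
    valStep key mt c =
      if pyStrLen c < pyStrLen (pyMetaGet mt key) then pyMetaGet mt key else c := by
  simp [valStep, h1, h2, hkey]

-- short keys: once non-empty, the value sticks
lemma foldl_valStep_keep (key : String)
    (hkey : (key == "title" || key == "population" || key == "condition") = false)
    (metas : List (List (String × Option String))) (c : Option String)
    (hc : isEmptyVal c = false) :
    metas.foldl (fun c mt => valStep key mt c) c = c := by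
  induction metas with
  | nil => rfl
  | cons mt rest ih =>
    rw [List.foldl_cons]
    by_cases hv : isEmptyVal (pyMetaGet mt key) = true
    · rw [valStep_of_empty_v _ _ _ hv, ih]
    · rw [valStep_short _ _ _ hkey (Bool.not_eq_true _ ▸ hv) hc, ih]

lemma foldl_valStep_eq_firstNonempty (key : String)
    (hkey : (key == "title" || key == "population" || key == "condition") = false)
    (metas : List (List (String × Option String))) (c : Option String)
    (hc : isEmptyVal c = true) :
    metas.foldl (fun c mt => valStep key mt c) c = firstNonempty metas key c := by
  induction metas with
  | nil => rfl
  | cons mt rest ih =>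
    rw [List.foldl_cons]
    by_cases hv : isEmptyVal (pyMetaGet mt key) = true
    · rw [valStep_of_empty_v _ _ _ hv, ih]
      simp [firstNonempty, hv]
    · have hv' : isEmptyVal (pyMetaGet mt key) = false := Bool.not_eq_true _ ▸ hv
      rw [valStep_of_empty_c _ _ _ hv' hc,
          foldl_valStep_keep key hkey rest _ hv']
      simp [firstNonempty, hv']

-- long keys: the running value is the first longest candidate
lemma foldl_valStep_long (key : String)
    (hkey : (key == "title" || key == "population" || key == "condition") = true)
    (metas : List (List (String × Option String))) (c : Option String)
    (hc : isEmptyVal c = false) :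
    metas.foldl (fun c mt => valStep key mt c) c =
      ((metas.filter (fun m => !(isEmptyVal (pyMetaGet m key)))).map
        (fun m => pyMetaGet m key)).foldl
        (fun acc v => if pyStrLen acc < pyStrLen v then v else acc) c := by
  induction metas generalizing c with
  | nil => rfl
  | cons mt rest ih =>
    rw [List.foldl_cons]
    by_cases hv : isEmptyVal (pyMetaGet mt key) = true
    · rw [valStep_of_empty_v _ _ _ hv, ih _ hc,
          List.filter_cons_of_neg (by simp [hv])]
    · have hv' : isEmptyVal (pyMetaGet mt key) = false := Bool.not_eq_true _ ▸ hv
      have hnext : isEmptyVal (if pyStrLen c < pyStrLen (pyMetaGet mt key)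
          then pyMetaGet mt key else c) = false := by
        split_ifs <;> assumption
      rw [valStep_long _ _ _ hkey hv' hc, ih _ hnext,
          List.filter_cons_of_pos (p := fun m => !isEmptyVal (pyMetaGet m key)) (by simp [hv']),
          List.map_cons, List.foldl_cons]

lemma max?_cons (v : Option String) (cands : List (Option String)) :
    PySem.List.max? (v :: cands) pyStrLen =
    some (cands.foldl (fun acc w => if pyStrLen acc < pyStrLen w then w else acc) v) := by
  induction cands generalizing v with
  | nil => rfl
  | cons w rest ih =>
    have h1 : PySem.List.max? (v :: w :: rest) pyStrLen =
        PySem.List.max? ((if pyStrLen v < pyStrLen w then w else v) :: rest) pyStrLen := by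
      unfold PySem.List.max?
      simp only [List.foldl_cons]
      congr 1
      split_ifs <;> rfl
    rw [h1, ih, List.foldl_cons]

lemma foldl_valStep_eq_longestVal (key : String)
    (hkey : (key == "title" || key == "population" || key == "condition") = true)
    (metas : List (List (String × Option String))) :
    metas.foldl (fun c mt => valStep key mt c) (some "") = longestVal metas key := by
  induction metas with
  | nil => rfl
  | cons mt rest ih =>
    rw [List.foldl_cons]
    by_cases hv : isEmptyVal (pyMetaGet mt key) = true
    · rw [valStep_of_empty_v _ _ _ hv, ih]
      unfold longestVal
      rw [List.filter_cons_of_neg (by simp [hv])]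
    · have hv' : isEmptyVal (pyMetaGet mt key) = false := Bool.not_eq_true _ ▸ hv
      rw [valStep_of_empty_c _ _ _ hv' (by decide),
          foldl_valStep_long key hkey rest _ hv']
      unfold longestVal PySem.List.maxD
      rw [List.filter_cons_of_pos (p := fun m => !isEmptyVal (pyMetaGet m key)) (by simp [hv']),
          List.map_cons, max?_cons]
      rfl

-- ===== VERDICT (by name: the statement is the Claim_ definition above) =====
theorem merge_guideline_meta_py_spec : Claim_equal_merge_guideline_meta_py := by
  intro metas _
  unfold Spec_merge_guideline_meta_py merge_guideline_meta_py merge_guideline_meta_py_alt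
  have hkeys := keys_foldl_mergeStep metas (PySem.Dict.mk initItems) (by decide)
  have hnd : (metas.foldl mergeStep (PySem.Dict.mk initItems)).keys.Nodup := by
    rw [hkeys]; decide
  rw [PySem.Dict.items_eq_map_keys _ hnd none, hkeys]
  simp only [keyList, List.map_cons, List.map_nil]
  rw [getD_foldl_mergeStep metas _ "title" (by decide) (by decide),
      getD_foldl_mergeStep metas _ "short_title" (by decide) (by decide),
      getD_foldl_mergeStep metas _ "source" (by decide) (by decide),
      getD_foldl_mergeStep metas _ "version" (by decide) (by decide),
      getD_foldl_mergeStep metas _ "last_updated" (by decide) (by decide),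
      getD_foldl_mergeStep metas _ "url" (by decide) (by decide),
      getD_foldl_mergeStep metas _ "condition" (by decide) (by decide),
      getD_foldl_mergeStep metas _ "population" (by decide) (by decide),
      show (PySem.Dict.mk initItems).getD "title" none = some "" from by decide,
      show (PySem.Dict.mk initItems).getD "short_title" none = some "" from by decide,
      show (PySem.Dict.mk initItems).getD "source" none = some "" from by decide,
      show (PySem.Dict.mk initItems).getD "version" none = some "" from by decide,
      show (PySem.Dict.mk initItems).getD "last_updated" none = some "" from by decide,
      show (PySem.Dict.mk initItems).getD "url" none = none from by decide,
      show (PySem.Dict.mk initItems).getD "condition" none = some "" from by decide,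
      show (PySem.Dict.mk initItems).getD "population" none = some "" from by decide]
  rw [foldl_valStep_eq_longestVal "title" (by decide) metas,
      foldl_valStep_eq_longestVal "condition" (by decide) metas,
      foldl_valStep_eq_longestVal "population" (by decide) metas,
      foldl_valStep_eq_firstNonempty "short_title" (by decide) metas _ (by decide),
      foldl_valStep_eq_firstNonempty "source" (by decide) metas _ (by decide),
      foldl_valStep_eq_firstNonempty "version" (by decide) metas _ (by decide),
      foldl_valStep_eq_firstNonempty "last_updated" (by decide) metas _ (by decide),
      foldl_valStep_eq_firstNonempty "url" (by decide) metas _ (by decide)]
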